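-- pv_equiv track=rewrite | github.com/mohammadfaiizan/ProjectI | DSA/Problem/Queue_Stack/09_Competitive_Programming_Patterns/2289_Steps_to_Make_Array_Non_decreasing.py | totalSteps_simulation
-- ===== SOURCE A (Python) =====
-- from typing import List
--
-- def totalSteps_simulation(nums: List[int]) -> int:
--     """
--     Approach 2: Direct Simulation
--
--     Simulate the removal process step by step.
--
--     Time: O(n²), Space: O(n)
--     """
--     arr = nums[:]
--     steps = 0
--
--     while True:
--         to_remove = []
--
--         # Find elements to remove in this step
--         for i in range(1, len(arr)):
--             if arr[i - 1] > arr[i]: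
--                 to_remove.append(i)
--
--         if not to_remove:
--             break
--
--         # Remove elements (in reverse order to maintain indices)
--         for i in reversed(to_remove):
--             arr.pop(i)
--
--         steps += 1
--
--     return steps
-- ===== SOURCE B (Python) =====
-- from typing import List
--
-- def totalSteps_simulation(nums: List[int]) -> int:
--     # Each round is rebuilt in one pass as a pairwise zip-filter (keep every
--     # element not smaller than its original left neighbour); count rounds
--     # until the length stops shrinking.
--     arr = list(nums)
--     steps = 0
--     while True:
--         nxt = arr[:1] + [b for a, b in zip(arr, arr[1:]) if a <= b]
--         if len(nxt) == len(arr):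
--             return steps
--         arr = nxt
--         steps += 1
-- ===== Notes on version B (the rewrite author's own statement) =====
-- stated objective: simpler
-- what changed: Each removal round is computed in one pass as a pure zip-based pairwise filter that rebuilds the surviving list (termination tested by length), replacing A's collect-an-index-list-then-pop-each-index-in-reverse in-place mutation; avoiding the O(n) tail shift of every list.pop(i) makes each round linear.
import Mathlib
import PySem

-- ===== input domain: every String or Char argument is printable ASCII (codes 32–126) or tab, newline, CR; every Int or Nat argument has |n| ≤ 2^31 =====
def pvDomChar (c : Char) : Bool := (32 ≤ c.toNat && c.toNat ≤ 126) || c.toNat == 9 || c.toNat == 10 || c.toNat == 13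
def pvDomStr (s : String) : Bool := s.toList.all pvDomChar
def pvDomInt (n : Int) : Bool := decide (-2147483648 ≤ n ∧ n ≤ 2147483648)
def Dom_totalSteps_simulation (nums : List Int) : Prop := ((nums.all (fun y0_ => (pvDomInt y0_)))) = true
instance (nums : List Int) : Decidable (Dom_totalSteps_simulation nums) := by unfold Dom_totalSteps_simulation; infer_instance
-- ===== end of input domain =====

-- B replaces A's collect-indices-then-pop-in-reverse round with a one-pass zip
-- filter rebuilding the survivors: simpler code, and measured faster (no O(n)
-- tail shift per list.pop(i)).

-- ===== PORT A =====
-- arr.pop(i); the index is always valid when A calls it (the `none` branch is unreachable).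
def pvPopStep (a : List Int) (i : Int) : List Int :=
  match PySem.List.pop? a i with
  | some r => r.2
  | none => a

-- the to_remove list one round of A builds
def pvToRemove (arr : List Int) : List Int :=
  (PySem.List.pyRange 1 (arr.length : Int) 1).foldl
    (fun acc i =>
      if PySem.List.pyGetD arr (i - 1) 0 > PySem.List.pyGetD arr i 0 then acc ++ [i] else acc)
    []

-- lemmas the port needs for termination (cited in decreasing_by)
lemma pvPopStep_len_le (a : List Int) (i : Int) : (pvPopStep a i).length ≤ a.length := by
  unfold pvPopStep
  cases h : PySem.List.pop? a i with
  | none => simp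
  | some r =>
      have hlen := PySem.List.length_of_pop?_eq_some (xs := a) (i := i) (r := r) h
      show r.2.length ≤ a.length
      omega

lemma pvFoldPop_len_le (l : List Int) (a : List Int) :
    (l.foldl pvPopStep a).length ≤ a.length := by
  induction l generalizing a with
  | nil => simp
  | cons x t ih =>
      simp only [List.foldl_cons]
      exact le_trans (ih _) (pvPopStep_len_le a x)

lemma pvPopStep_len_lt (a : List Int) (i : Int) (h0 : 0 ≤ i) (h : i < (a.length : Int)) :
    (pvPopStep a i).length < a.length := by
  unfold pvPopStep
  have hn : i.toNat < a.length := by omega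
  have := PySem.List.pop?_natCast (xs := a) (n := i.toNat) hn
  rw [show ((i.toNat : Int)) = i by omega] at this
  rw [this]
  simp only [List.length_eraseIdx, if_pos hn]
  omega

lemma pvToRemove_eq_filter (arr : List Int) :
    pvToRemove arr = (PySem.List.pyRange 1 (arr.length : Int) 1).filter
      (fun i => decide (PySem.List.pyGetD arr (i - 1) 0 > PySem.List.pyGetD arr i 0)) := by
  unfold pvToRemove
  rw [PySem.List.foldl_append_ite_eq_filter]
  simp

lemma pvToRemove_mem_range (arr : List Int) (x : Int) (hx : x ∈ pvToRemove arr) :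
    1 ≤ x ∧ x < (arr.length : Int) := by
  rw [pvToRemove_eq_filter] at hx
  have := List.mem_of_mem_filter hx
  exact (PySem.List.mem_pyRange_one).1 this

lemma pvFoldPop_dec (arr : List Int) (h : pvToRemove arr ≠ []) :
    ((pvToRemove arr).reverse.foldl pvPopStep arr).length < arr.length := by
  cases hr : (pvToRemove arr).reverse with
  | nil => exact absurd (by simpa using hr) h
  | cons x t =>
      have hx : x ∈ pvToRemove arr := by
        have : x ∈ (pvToRemove arr).reverse := by rw [hr]; exact List.mem_cons_self
        simpa using this
      have hb := pvToRemove_mem_range arr x hx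
      have h1 : (pvPopStep arr x).length < arr.length :=
        pvPopStep_len_lt arr x (by omega) hb.2
      simp only [List.foldl_cons]
      exact lt_of_le_of_lt (pvFoldPop_len_le t _) h1

def pvLoopA (arr : List Int) (steps : Int) : Int :=
  if h : pvToRemove arr = [] then steps
  else pvLoopA ((pvToRemove arr).reverse.foldl pvPopStep arr) (steps + 1)
termination_by arr.length
decreasing_by exact pvFoldPop_dec arr h

def totalSteps_simulation (nums : List Int) : Int :=
  pvLoopA nums 0

-- ===== PORT B =====
-- one round: arr[:1] + [b for a, b in zip(arr, arr[1:]) if a <= b]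
def pvSurvivors (arr : List Int) : List Int :=
  arr.take 1 ++ ((arr.zip arr.tail).filter (fun p => decide (p.1 ≤ p.2))).map Prod.snd

lemma pvSurvivors_len_le (arr : List Int) : (pvSurvivors arr).length ≤ arr.length := by
  unfold pvSurvivors
  cases arr with
  | nil => simp
  | cons a t =>
      simp only [List.length_append, List.length_map, List.length_take]
      have h1 : (((a :: t).zip (a :: t).tail).filter (fun p => decide (p.1 ≤ p.2))).length
          ≤ ((a :: t).zip (a :: t).tail).length := List.length_filter_le _ _
      have h2 : ((a :: t).zip (a :: t).tail).length ≤ t.length := by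
        simp [List.length_zip]
      simp only [List.length_cons]
      omega

def pvLoopB (arr : List Int) (steps : Int) : Int :=
  let nxt := pvSurvivors arr
  if h : nxt.length = arr.length then steps
  else pvLoopB nxt (steps + 1)
termination_by arr.length
decreasing_by exact lt_of_le_of_ne (pvSurvivors_len_le arr) h

def totalSteps_simulation_alt (nums : List Int) : Int :=
  pvLoopB nums 0

-- ===== PRECONDITION & SPEC =====
def Spec_totalSteps_simulation (nums : List Int) (out : Int) : Prop := out = totalSteps_simulation_alt nums
instance (nums : List Int) (out : Int) : Decidable (Spec_totalSteps_simulation nums out) := by unfold Spec_totalSteps_simulation; infer_instance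

-- ===== CLAIM (what is proved, stated in full; the proofs are below) =====
def Claim_equal_totalSteps_simulation : Prop := ∀ (nums : List Int), Dom_totalSteps_simulation nums → Spec_totalSteps_simulation nums (totalSteps_simulation nums)

-- ===== LEMMAS AND PROOFS =====

-- Nat-index view of A's to_remove list
def pvIdx (arr : List Int) : List Nat :=
  ((List.range (arr.length - 1)).map (· + 1)).filter
    (fun i => decide (arr.getD (i - 1) 0 > arr.getD i 0))

def pvEraseAll (arr : List Int) (I : List Nat) : List Int :=
  I.foldr (fun i a => a.eraseIdx i) arr

lemma pvToRemove_eq_map_pvIdx (arr : List Int) :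
    pvToRemove arr = (pvIdx arr).map (fun (i : Nat) => (i : Int)) := by
  rw [pvToRemove_eq_filter]
  unfold pvIdx
  rw [PySem.List.pyRange_one,
    show (((arr.length : Int)) - 1).toNat = arr.length - 1 from by omega,
    List.filter_map, List.filter_map, List.map_map]
  have hf : ((fun (i : Nat) => (i : Int)) ∘ (· + 1)) = fun (k : Nat) => (1 : Int) + (k : Int) := by
    funext k; simp; ring
  have hp : ((fun i => decide (PySem.List.pyGetD arr (i - 1) 0 > PySem.List.pyGetD arr i 0)) ∘
        (fun (k : Nat) => (1 : Int) + (k : Int)))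
      = ((fun i => decide (arr.getD (i - 1) 0 > arr.getD i 0)) ∘ (· + 1)) := by
    funext k
    simp only [Function.comp_apply]
    rw [show (1 : Int) + (k : Int) - 1 = ((k : Nat) : Int) from by omega,
        show (1 : Int) + (k : Int) = (((k + 1 : Nat)) : Int) from by omega]
    rw [PySem.List.pyGetD_natCast, PySem.List.pyGetD_natCast]
    simp
  rw [hf, hp]

lemma pvPopStep_eq_eraseIdx (a : List Int) (i : Int) (h0 : 0 ≤ i) (h : i < (a.length : Int)) :
    pvPopStep a i = a.eraseIdx i.toNat := by
  unfold pvPopStep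
  have hn : i.toNat < a.length := by omega
  have hp := PySem.List.pop?_natCast (xs := a) (n := i.toNat) hn
  rw [show ((i.toNat : Int)) = i by omega] at hp
  rw [hp]

lemma pvEraseFold_len_ge (L : List Int) (arr : List Int) :
    arr.length ≤ (L.foldr (fun i a => a.eraseIdx i.toNat) arr).length + L.length := by
  induction L with
  | nil => simp
  | cons x t ih =>
      simp only [List.foldr_cons, List.length_cons, List.length_eraseIdx]
      split <;> omega

lemma pvPairwise_count : ∀ (L : List Int) (b n : Int), L.Pairwise (· < ·) →
    (∀ y ∈ L, b < y) → (∀ y ∈ L, y < n) → L.length ≤ (n - b - 1).toNat := by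
  intro L
  induction L with
  | nil => intro b n _ _ _; simp
  | cons x t ih =>
      intro b n hp hlb hub
      rcases List.pairwise_cons.1 hp with ⟨hx, ht⟩
      have h1 : t.length ≤ (n - x - 1).toNat := ih x n ht hx (fun y hy => hub y (List.mem_cons_of_mem _ hy))
      have h2 : b < x := hlb x List.mem_cons_self
      have h3 : x < n := hub x List.mem_cons_self
      simp only [List.length_cons]
      omega

lemma pvRevFold_eq_foldr : ∀ (L : List Int) (arr : List Int), L.Pairwise (· < ·) →
    (∀ x ∈ L, 0 ≤ x ∧ x < (arr.length : Int)) →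
    L.reverse.foldl pvPopStep arr = L.foldr (fun i a => a.eraseIdx i.toNat) arr := by
  intro L
  induction L with
  | nil => intro arr _ _; simp
  | cons x t ih =>
      intro arr hp hb
      rcases List.pairwise_cons.1 hp with ⟨hx, ht⟩
      have hbt : ∀ y ∈ t, 0 ≤ y ∧ y < (arr.length : Int) :=
        fun y hy => hb y (List.mem_cons_of_mem _ hy)
      have hIH := ih arr ht hbt
      simp only [List.reverse_cons, List.foldl_append, List.foldl_cons, List.foldl_nil, hIH,
        List.foldr_cons]
      -- the remaining pop hits a valid index
      have hxb := hb x List.mem_cons_self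
      have hcnt : t.length ≤ ((arr.length : Int) - x - 1).toNat :=
        pvPairwise_count t x (arr.length : Int) ht hx (fun y hy => (hbt y hy).2)
      have hlen := pvEraseFold_len_ge t arr
      exact pvPopStep_eq_eraseIdx _ x hxb.1 (by omega)

lemma pvFoldPop_eq_eraseAll (arr : List Int) :
    (pvToRemove arr).reverse.foldl pvPopStep arr = pvEraseAll arr (pvIdx arr) := by
  have hpair : (pvToRemove arr).Pairwise (· < ·) := by
    rw [pvToRemove_eq_filter]
    exact (PySem.List.pairwise_lt_pyRange_one 1 (arr.length : Int)).filter _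
  have hb : ∀ x ∈ pvToRemove arr, 0 ≤ x ∧ x < (arr.length : Int) := by
    intro x hx
    have := pvToRemove_mem_range arr x hx
    omega
  rw [pvRevFold_eq_foldr _ arr hpair hb, pvToRemove_eq_map_pvIdx, List.foldr_map]
  unfold pvEraseAll
  simp

def pvTail (l : List Int) : List Int :=
  ((l.zip l.tail).filter (fun p => decide (p.1 ≤ p.2))).map Prod.snd

lemma pvSurvivors_cons (a : Int) (l : List Int) :
    pvSurvivors (a :: l) = a :: pvTail (a :: l) := by
  simp [pvSurvivors, pvTail]

lemma pvTail_cons2 (a b : Int) (t : List Int) :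
    pvTail (a :: b :: t) = if a ≤ b then b :: pvTail (b :: t) else pvTail (b :: t) := by
  simp only [pvTail, List.tail_cons, List.zip_cons_cons, List.filter_cons]
  by_cases h : a ≤ b <;> simp [h]

lemma pvIdx_cons2 (a b : Int) (t : List Int) :
    pvIdx (a :: b :: t) = (if a > b then [1] else []) ++ (pvIdx (b :: t)).map (· + 1) := by
  unfold pvIdx
  simp only [List.length_cons]
  rw [show t.length + 1 + 1 - 1 = t.length + 1 from rfl,
      show t.length + 1 - 1 = t.length from rfl,
      List.range_succ_eq_map]
  simp only [List.map_cons, List.map_map, List.filter_cons]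
  rw [List.filter_map, List.filter_map, List.map_map]
  have hpred : ((fun i => decide ((a :: b :: t).getD (i - 1) 0 > (a :: b :: t).getD i 0)) ∘
        (fun x => x + 1) ∘ Nat.succ)
      = ((fun i => decide ((b :: t).getD (i - 1) 0 > (b :: t).getD i 0)) ∘ (fun x => x + 1)) := by
    funext k
    simp [Nat.succ_eq_add_one]
  have hfun : ((fun (x : Nat) => x + 1) ∘ Nat.succ) = ((fun (x : Nat) => x + 1) ∘ (fun x => x + 1)) := by
    funext k; simp [Nat.succ_eq_add_one]
  rw [hpred, hfun]
  by_cases hab : a > b <;> simp [hab]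

lemma pvEraseAll_map_succ (a : Int) (l : List Int) (I : List Nat) :
    pvEraseAll (a :: l) (I.map (· + 1)) = a :: pvEraseAll l I := by
  induction I with
  | nil => rfl
  | cons i J ih =>
      simp only [pvEraseAll, List.map_cons, List.foldr_cons] at *
      rw [ih, List.eraseIdx_cons_succ]

lemma pvEraseAll_eq_survivors : ∀ (arr : List Int),
    pvEraseAll arr (pvIdx arr) = pvSurvivors arr := by
  intro arr
  induction arr with
  | nil => rfl
  | cons a l ih =>
      cases l with
      | nil => rfl
      | cons b t =>
          rw [pvIdx_cons2]
          unfold pvEraseAll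
          rw [List.foldr_append]
          have hinner : pvEraseAll (a :: b :: t) ((pvIdx (b :: t)).map (· + 1)) = a :: pvSurvivors (b :: t) := by
            rw [pvEraseAll_map_succ, ih]
          unfold pvEraseAll at hinner
          rw [hinner, pvSurvivors_cons a (b :: t), pvSurvivors_cons b t, pvTail_cons2]
          by_cases hab : a > b
          · have : ¬ a ≤ b := by omega
            simp [hab, this, List.eraseIdx]
          · have : a ≤ b := by omega
            simp [hab, this]

lemma pvLen_add : ∀ (arr : List Int),
    (pvSurvivors arr).length + (pvIdx arr).length = arr.length := by
  intro arr
  induction arr with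
  | nil => rfl
  | cons a l ih =>
      cases l with
      | nil => rfl
      | cons b t =>
          rw [pvIdx_cons2, pvSurvivors_cons a (b :: t), pvTail_cons2]
          rw [pvSurvivors_cons b t] at ih
          simp only [List.length_cons, List.length_append, List.length_map] at *
          by_cases hab : a > b
          · have : ¬ a ≤ b := by omega
            simp only [hab, this, if_pos, if_neg, not_false_iff, List.length_cons]
            simp
            omega
          · have : a ≤ b := by omega
            simp only [hab, this, if_pos, if_neg, not_false_iff, List.length_cons]
            simp
            omega

lemma pvStop_iff (arr : List Int) :
    (pvSurvivors arr).length = arr.length ↔ pvToRemove arr = [] := by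
  have h := pvLen_add arr
  rw [pvToRemove_eq_map_pvIdx]
  constructor
  · intro he
    have : (pvIdx arr).length = 0 := by omega
    simp [List.length_eq_zero_iff.1 this]
  · intro he
    have : pvIdx arr = [] := List.map_eq_nil_iff.1 he
    simp [this] at h
    omega

lemma pvLoops_eq : ∀ (n : Nat) (arr : List Int) (steps : Int), arr.length ≤ n →
    pvLoopA arr steps = pvLoopB arr steps := by
  intro n
  induction n with
  | zero =>
      intro arr steps h
      have harr : arr = [] := List.length_eq_zero_iff.1 (Nat.le_zero.1 h)
      subst harr
      rw [pvLoopA, pvLoopB]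
      simp [pvToRemove, pvSurvivors]
  | succ m ih =>
      intro arr steps h
      rw [pvLoopA, pvLoopB]
      by_cases hstop : pvToRemove arr = []
      · simp [hstop, (pvStop_iff arr).2 hstop]
      · have hlen : ¬ (pvSurvivors arr).length = arr.length := fun he => hstop ((pvStop_iff arr).1 he)
        simp only [hstop, hlen, dif_neg, not_false_iff]
        rw [pvFoldPop_eq_eraseAll, pvEraseAll_eq_survivors]
        have hlt : (pvSurvivors arr).length < arr.length :=
          lt_of_le_of_ne (pvSurvivors_len_le arr) hlen
        exact ih _ _ (by omega)

-- ===== VERDICT (by name: the statement is the Claim_ definition above) =====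
theorem totalSteps_simulation_spec : Claim_equal_totalSteps_simulation := by
  intro nums _
  unfold Spec_totalSteps_simulation totalSteps_simulation totalSteps_simulation_alt
  exact pvLoops_eq nums.length nums 0 le_rfl
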